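-- pv_equiv track=rewrite | github.com/cvkdnk/polar_fusion | process_config.py | yield_line_every5
-- ===== SOURCE A (Python) =====
-- def yield_line_every5(l):
--     """yield a string line every 5 elements"""
--     str_line = "#"
--     for idx, l_i in enumerate(l):
--         if idx % 5 == 0 and idx != 0:
--             yield str_line + "\n"
--             str_line = "#"
--         str_line += f" [{l_i}]"
--     yield str_line + "\n"
-- ===== SOURCE B (Python) =====
-- def yield_line_every5(l):
--     """yield a string line every 5 elements"""
--     items = list(l)
--     chunks = []
--     i = 0
--     while i < len(items):
--         chunks.append(items[i:i + 5])
--         i += 5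
--     if not chunks:
--         chunks = [[]]
--     for chunk in chunks:
--         yield "#" + "".join(" [{}]".format(x) for x in chunk) + "\n"
-- ===== Notes on version B (the rewrite author's own statement) =====
-- stated objective: alternative
-- what changed: B chunks the input into consecutive groups of 5 and maps each chunk to its line (joining the formatted elements), instead of A's single enumerate loop with a running accumulator flushed on an index-modulus test.
import Mathlib
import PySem

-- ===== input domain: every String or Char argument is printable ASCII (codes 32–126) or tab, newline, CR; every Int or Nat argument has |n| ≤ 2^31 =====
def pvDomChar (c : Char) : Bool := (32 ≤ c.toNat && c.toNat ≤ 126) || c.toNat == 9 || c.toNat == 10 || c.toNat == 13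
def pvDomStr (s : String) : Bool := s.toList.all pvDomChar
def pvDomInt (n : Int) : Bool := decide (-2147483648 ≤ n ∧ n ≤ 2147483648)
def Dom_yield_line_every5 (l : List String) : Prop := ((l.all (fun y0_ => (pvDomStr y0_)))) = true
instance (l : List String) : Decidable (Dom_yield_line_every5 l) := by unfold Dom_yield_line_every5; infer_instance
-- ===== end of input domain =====

-- B chunks the input into groups of 5 and maps each chunk to a line, instead of A's running
-- accumulator flushed on an index-modulus test; equally fast, genuinely different decomposition.
-- A is a generator; its yielded sequence is ported as the returned List String.

-- ===== PORT A =====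
-- loop body of A: on each (idx, l_i), maybe flush str_line, then append " [l_i]"
def pvStepA (st : String × List String) (p : Int × String) : String × List String :=
  let fl := if PySem.Int.mod p.1 5 == 0 && p.1 != 0
            then ("#", st.2 ++ [st.1 ++ "\n"])
            else (st.1, st.2)
  (fl.1 ++ " [" ++ p.2 ++ "]", fl.2)

def yield_line_every5 (l : List String) : List String :=
  let r := (PySem.List.enumerate l).foldl pvStepA ("#", [])
  r.2 ++ [r.1 ++ "\n"]

-- ===== PORT B =====
-- the while-loop of Source B: 'while i < len(items): chunks.append(items[i:i+5]); i += 5'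
def yl5ChunksGo (items : List String) (i : Nat) : List (List String) :=
  if i < items.length then
    PySem.List.slice items (some (i : Int)) (some ((i : Int) + 5)) :: yl5ChunksGo items (i + 5)
  else []
termination_by items.length - i

-- '"#" + "".join(" [{}]".format(x) for x in chunk) + "\n"'
def yl5Line (g : List String) : String :=
  "#" ++ String.join (g.map (fun x => " [" ++ x ++ "]")) ++ "\n"

def yield_line_every5_alt (l : List String) : List String :=
  let chunks := yl5ChunksGo l 0
  let chunks := if chunks = [] then [[]] else chunks
  chunks.map yl5Line

-- ===== PRECONDITION & SPEC =====
def Spec_yield_line_every5 (l : List String) (out : List String) : Prop := out = yield_line_every5_alt l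
instance (l : List String) (out : List String) : Decidable (Spec_yield_line_every5 l out) := by unfold Spec_yield_line_every5; infer_instance

-- ===== CLAIM (what is proved, stated in full; the proofs are below) =====
def Claim_equal_yield_line_every5 : Prop := ∀ (l : List String), Dom_yield_line_every5 l → Spec_yield_line_every5 l (yield_line_every5 l)

-- ===== LEMMAS AND PROOFS =====

-- proof-side view of Source B's chunking loop: groups of 5 by take/drop
def yl5Chunks (l : List String) : List (List String) :=
  if h : l = [] then []
  else l.take 5 :: yl5Chunks (l.drop 5)
termination_by l.length
decreasing_by
  simp only [List.length_drop]
  have : 0 < l.length := List.length_pos_iff.mpr h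
  omega

lemma yl5ChunksGo_eq (items : List String) (i : Nat) :
    yl5ChunksGo items i = yl5Chunks (items.drop i) := by
  rw [yl5ChunksGo]
  by_cases hi : i < items.length
  · have hne : items.drop i ≠ [] := by
      intro hnil
      have := List.length_drop (l := items) (i := i) ▸ congrArg List.length hnil
      simp at this
      omega
    rw [if_pos hi, yl5ChunksGo_eq items (i + 5)]
    conv_rhs => rw [yl5Chunks]
    rw [dif_neg hne]
    have hsl : PySem.List.slice items (some (i : Int)) (some ((i : Int) + 5)) =
        (items.drop i).take 5 := by
      have := PySem.List.slice_natCast_add (xs := items) (j := i) (n := 5)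
      simpa using this
    rw [hsl, List.drop_drop]
  · rw [if_neg hi]
    have : items.drop i = [] := List.drop_eq_nil_of_le (by omega)
    rw [this, yl5Chunks]
    simp
termination_by items.length - i

lemma yl5_foldl_str (as : List String) : ∀ a : String,
    List.foldl (fun r s => r ++ s) a as = a ++ List.foldl (fun r s => r ++ s) "" as := by
  induction as with
  | nil => intro a; simp [List.foldl, String.append_empty]
  | cons b bs ih =>
      intro a
      simp only [List.foldl]
      rw [ih (a ++ b), ih ("" ++ b)]
      simp [String.append_assoc]

lemma yl5_join_cons (a : String) (as : List String) :
    String.join (a :: as) = a ++ String.join as := by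
  simp only [String.join, List.foldl]
  rw [yl5_foldl_str as ("" ++ a)]
  simp

lemma yl5_mod_ne (n k : Int) (h : PySem.Int.mod n 5 = 0) (hk1 : 1 ≤ k) (hk4 : k ≤ 4) :
    PySem.Int.mod (n + k) 5 ≠ 0 := by
  simp only [PySem.Int.mod] at h ⊢
  rw [Int.fmod_eq_emod] at h ⊢
  omega

-- folding a group whose indices never trigger the flush just accumulates the tags
lemma yl5_fold_chunk (g : List String) : ∀ (n : Int) (s : String) (out : List String),
    (∀ k : Nat, k < g.length → ¬(PySem.Int.mod (n + k) 5 = 0 ∧ n + k ≠ 0)) →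
    (PySem.List.enumerate g n).foldl pvStepA (s, out) =
      (s ++ String.join (g.map (fun x => " [" ++ x ++ "]")), out) := by
  induction g with
  | nil => intro n s out _; simp [PySem.List.enumerate_nil, String.join, String.append_empty]
  | cons x xs ih =>
      intro n s out h
      rw [PySem.List.enumerate_cons]
      simp only [List.foldl]
      have h0 : ¬(PySem.Int.mod n 5 = 0 ∧ n ≠ 0) := by simpa using h 0 (by simp)
      have hstep : pvStepA (s, out) (n, x) = (s ++ " [" ++ x ++ "]", out) := by
        have hPn : ¬(5 ∣ n ∧ ¬n = 0) := by
          rintro ⟨hd, hn⟩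
          refine h0 ⟨?_, hn⟩
          simp only [PySem.Int.mod]; rw [Int.fmod_eq_emod]; omega
        simp only [pvStepA]
        simp [hPn]
      rw [hstep]
      rw [ih (n + 1) _ out (by
        intro k hk
        have := h (k + 1) (by simpa using Nat.succ_lt_succ hk)
        push_cast at this ⊢
        rw [show n + (1:Int) + (k : Int) = n + ((k:Int) + 1) by ring]
        simpa using this)]
      rw [List.map_cons, yl5_join_cons]
      simp [String.append_assoc]

-- tail lemma: from a chunk boundary (n > 0, n ≡ 0 mod 5) the loop flushes and then
-- produces exactly one line per 5-chunk of the rest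
lemma yl5_fold_flush : ∀ (m : Nat) (rest : List String), rest.length ≤ m →
    ∀ (n : Int) (s : String) (out : List String),
    PySem.Int.mod n 5 = 0 → 0 < n →
    (let r := (PySem.List.enumerate rest n).foldl pvStepA (s, out)
     r.2 ++ [r.1 ++ "\n"]) = (out ++ [s ++ "\n"]) ++ (yl5Chunks rest).map yl5Line := by
  intro m
  induction m with
  | zero =>
      intro rest hlen n s out _ _
      have : rest = [] := List.eq_nil_of_length_eq_zero (Nat.le_zero.mp hlen)
      subst this
      simp [PySem.List.enumerate_nil, yl5Chunks]
  | succ m ih =>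
      intro rest hlen n s out hmod hpos
      cases rest with
      | nil => simp [PySem.List.enumerate_nil, yl5Chunks]
      | cons x xs =>
        rw [PySem.List.enumerate_cons]
        simp only [List.foldl]
        have hstep : pvStepA (s, out) (n, x) = ("#" ++ " [" ++ x ++ "]", out ++ [s ++ "\n"]) := by
          have hP : 5 ∣ n ∧ ¬n = 0 := by
            constructor
            · simp only [PySem.Int.mod] at hmod; rw [Int.fmod_eq_emod] at hmod; omega
            · omega
          simp only [pvStepA]
          simp [hP]
        rw [hstep]
        -- split xs into its first (at most) 4 elements and the remainder
        have hen : PySem.List.enumerate xs (n + 1) =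
            PySem.List.enumerate (xs.take 4) (n + 1) ++
              PySem.List.enumerate (xs.drop 4) (n + 1 + ((xs.take 4).length : Int)) := by
          conv_lhs => rw [← List.take_append_drop 4 xs]
          rw [PySem.List.enumerate_append]
        rw [hen, List.foldl_append]
        rw [yl5_fold_chunk (xs.take 4) (n + 1) _ _ (by
          intro k hk
          have hk4 : k < 4 := lt_of_lt_of_le hk (by simp [List.length_take])
          rintro ⟨hm, _⟩
          exact yl5_mod_ne n (1 + k) hmod (by omega) (by push_cast; omega)
            (by rw [show n + (1 + (k:Int)) = n + 1 + (k:Int) by ring]; exact hm))]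
        have hch : yl5Chunks (x :: xs) = (x :: xs.take 4) :: yl5Chunks (xs.drop 4) := by
          rw [yl5Chunks]
          simp [List.take_succ_cons, List.drop_succ_cons]
        rw [hch]
        have hlit : ("#" ++ " [" : String) = "# [" := by decide
        by_cases hlong : xs.length ≤ 4
        · have hdrop : xs.drop 4 = [] := List.drop_eq_nil_of_le hlong
          rw [hdrop]
          simp [PySem.List.enumerate_nil, yl5Chunks, yl5Line, yl5_join_cons, String.append_assoc, hlit]
          rw [← hlit, String.append_assoc]
        · have hmod' : PySem.Int.mod (n + 1 + ((xs.take 4).length : Int)) 5 = 0 := by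
            simp only [PySem.Int.mod] at hmod ⊢
            rw [Int.fmod_eq_emod] at hmod ⊢
            rw [List.length_take]
            have hmin : min 4 xs.length = 4 := by omega
            rw [hmin]
            omega
          have hpos' : 0 < n + 1 + ((xs.take 4).length : Int) := by positivity
          have hlen' : (xs.drop 4).length ≤ m := by
            simp only [List.length_drop]
            have : xs.length + 1 ≤ m + 1 := by simpa using hlen
            omega
          rw [ih (xs.drop 4) hlen' _ _ _ hmod' hpos']
          simp [yl5Line, yl5_join_cons, String.append_assoc, hlit]
          rw [← hlit, String.append_assoc]

-- ===== VERDICT (by name: the statement is the Claim_ definition above) =====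
theorem yield_line_every5_spec : Claim_equal_yield_line_every5 := by
  intro l _
  show yield_line_every5 l = yield_line_every5_alt l
  by_cases hnil : l = []
  · subst hnil
    rw [yield_line_every5_alt, yl5ChunksGo_eq]
    simp [yield_line_every5, yl5Chunks, yl5Line,
      PySem.List.enumerate_nil, String.join, String.append_empty]
  · rw [yield_line_every5_alt, yl5ChunksGo_eq, List.drop_zero]
    simp only [yield_line_every5]
    have hen : PySem.List.enumerate l 0 =
        PySem.List.enumerate (l.take 5) 0 ++
          PySem.List.enumerate (l.drop 5) (0 + ((l.take 5).length : Int)) := by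
      conv_lhs => rw [← List.take_append_drop 5 l]
      rw [PySem.List.enumerate_append]
    rw [hen, List.foldl_append]
    rw [yl5_fold_chunk (l.take 5) 0 "#" List.nil (by
      intro k hk
      have hk5 : k < 5 := lt_of_lt_of_le hk (by simp [List.length_take])
      rintro ⟨hm, hne⟩
      rcases Nat.eq_zero_or_pos k with hz | hpk
      · subst hz; simp at hne
      · exact yl5_mod_ne 0 k (by decide) (by exact_mod_cast hpk)
          (by exact_mod_cast Nat.lt_succ_iff.mp hk5) (by simpa using hm))]
    have hch : yl5Chunks l = l.take 5 :: yl5Chunks (l.drop 5) := by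
      rw [yl5Chunks]
      simp [hnil]
    rw [hch]
    by_cases hshort : l.length ≤ 5
    · have hdrop : l.drop 5 = [] := List.drop_eq_nil_of_le hshort
      rw [hdrop]
      simp [PySem.List.enumerate_nil, yl5Chunks, yl5Line]
    · have hlt : min 5 l.length = 5 := by omega
      have hmod : PySem.Int.mod ((0:Int) + ((l.take 5).length : Int)) 5 = 0 := by
        rw [List.length_take, hlt]; decide
      have hpos : 0 < (0:Int) + ((l.take 5).length : Int) := by
        rw [List.length_take, hlt]; decide
      rw [yl5_fold_flush (l.drop 5).length (l.drop 5) le_rfl _ _ _ hmod hpos]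
      simp [yl5Line]
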